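-- pv_equiv track=rewrite | github.com/astilleman/Informatica5 | 12b - Roosters/Kleurendriehoek.py | kleuren
-- ===== SOURCE A (Python) =====
-- def kleuren(lijst):
--     green, red, yellow = 0, 0, 0
--     for i in range(len(lijst)):
--         for j in range(len(lijst[i])):
--             if lijst[i][j] == 'G':
--                 green += 1
--             elif lijst[i][j] == 'R':
--                 red += 1
--             elif lijst[i][j] == 'Y':
--                 yellow += 1
--     return green, red, yellow
-- ===== SOURCE B (Python) =====
-- def kleuren(lijst):
--     flat = [cell for row in lijst for cell in row]
--     return flat.count('G'), flat.count('R'), flat.count('Y')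
-- ===== Notes on version B (the rewrite author's own statement) =====
-- stated objective: simpler
-- what changed: Replaces the branch-updated three-accumulator nested index loop with flattening the grid once and three independent list.count passes, one per colour.
import Mathlib
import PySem

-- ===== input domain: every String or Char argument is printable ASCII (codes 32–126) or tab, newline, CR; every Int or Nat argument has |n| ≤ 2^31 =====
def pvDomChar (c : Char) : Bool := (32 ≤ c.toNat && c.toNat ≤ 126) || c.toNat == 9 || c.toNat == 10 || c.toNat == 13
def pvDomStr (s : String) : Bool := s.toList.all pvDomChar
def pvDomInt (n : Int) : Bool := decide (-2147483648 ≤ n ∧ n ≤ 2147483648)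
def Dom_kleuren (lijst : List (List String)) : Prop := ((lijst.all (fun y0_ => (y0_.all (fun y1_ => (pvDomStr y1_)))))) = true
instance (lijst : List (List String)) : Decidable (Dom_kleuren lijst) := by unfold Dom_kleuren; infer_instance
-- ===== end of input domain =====

-- B flattens the grid once and counts each colour with its own list.count pass,
-- instead of A's three branch-updated accumulators over nested index loops (simpler).

-- ===== PORT A =====
def kleuren (lijst : List (List String)) : Int × Int × Int :=
  (PySem.List.pyRange 0 (lijst.length : Int) 1).foldl (fun acc i =>
    let row := PySem.List.pyGetD lijst i []
    (PySem.List.pyRange 0 (row.length : Int) 1).foldl (fun acc j =>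
      let cell := PySem.List.pyGetD row j ""
      if cell = "G" then (acc.1 + 1, acc.2.1, acc.2.2)
      else if cell = "R" then (acc.1, acc.2.1 + 1, acc.2.2)
      else if cell = "Y" then (acc.1, acc.2.1, acc.2.2 + 1)
      else acc) acc) ((0 : Int), (0 : Int), (0 : Int))

-- ===== PORT B =====
def kleuren_alt (lijst : List (List String)) : Int × Int × Int :=
  let flat := lijst.flatMap (fun row => row)
  ((PySem.List.count flat "G" : Int), (PySem.List.count flat "R" : Int), (PySem.List.count flat "Y" : Int))

-- ===== PRECONDITION & SPEC =====
def Spec_kleuren (lijst : List (List String)) (out : Int × Int × Int) : Prop := out = kleuren_alt lijst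
instance (lijst : List (List String)) (out : Int × Int × Int) : Decidable (Spec_kleuren lijst out) := by unfold Spec_kleuren; infer_instance

-- ===== CLAIM =====
def Claim_equal_kleuren : Prop := ∀ (lijst : List (List String)), Dom_kleuren lijst → Spec_kleuren lijst (kleuren lijst)

-- ===== LEMMAS AND PROOFS =====

-- inner loop of A adds the row's counts to the accumulator
theorem kleuren_row (row : List String) (acc : Int × Int × Int) :
    row.foldl (fun acc cell =>
      if cell = "G" then (acc.1 + 1, acc.2.1, acc.2.2)
      else if cell = "R" then (acc.1, acc.2.1 + 1, acc.2.2)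
      else if cell = "Y" then (acc.1, acc.2.1, acc.2.2 + 1)
      else acc) acc
    = (acc.1 + row.count "G", acc.2.1 + row.count "R", acc.2.2 + row.count "Y") := by
  induction row generalizing acc with
  | nil => simp
  | cons c cs ih =>
    simp only [List.foldl_cons, ih, List.count_cons]
    by_cases hG : c = "G" <;> by_cases hR : c = "R" <;> by_cases hY : c = "Y" <;>
      simp_all <;> ring_nf

theorem kleuren_outer (lijst : List (List String)) (acc : Int × Int × Int) :
    lijst.foldl (fun acc row =>
      (PySem.List.pyRange 0 (row.length : Int) 1).foldl (fun acc j =>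
        let cell := PySem.List.pyGetD row j ""
        if cell = "G" then (acc.1 + 1, acc.2.1, acc.2.2)
        else if cell = "R" then (acc.1, acc.2.1 + 1, acc.2.2)
        else if cell = "Y" then (acc.1, acc.2.1, acc.2.2 + 1)
        else acc) acc) acc
    = (acc.1 + ((lijst.flatMap (fun row => row)).count "G" : Int),
       acc.2.1 + ((lijst.flatMap (fun row => row)).count "R" : Int),
       acc.2.2 + ((lijst.flatMap (fun row => row)).count "Y" : Int)) := by
  induction lijst generalizing acc with
  | nil => simp
  | cons row rest ih =>
    simp only [List.foldl_cons, List.flatMap_cons, List.count_append]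
    rw [PySem.List.foldl_pyRange_zero_pyGetD' row ""
      (fun acc cell =>
        if cell = "G" then (acc.1 + 1, acc.2.1, acc.2.2)
        else if cell = "R" then (acc.1, acc.2.1 + 1, acc.2.2)
        else if cell = "Y" then (acc.1, acc.2.1, acc.2.2 + 1)
        else acc) acc, kleuren_row, ih]
    simp [Prod.ext_iff]
    omega

theorem kleuren_counts (lijst : List (List String)) :
    kleuren lijst = (((lijst.flatMap (fun row => row)).count "G" : Int),
                     ((lijst.flatMap (fun row => row)).count "R" : Int),
                     ((lijst.flatMap (fun row => row)).count "Y" : Int)) := by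
  unfold kleuren
  rw [PySem.List.foldl_pyRange_zero_pyGetD' lijst []
    (fun acc row =>
      (PySem.List.pyRange 0 (row.length : Int) 1).foldl (fun acc j =>
        let cell := PySem.List.pyGetD row j ""
        if cell = "G" then (acc.1 + 1, acc.2.1, acc.2.2)
        else if cell = "R" then (acc.1, acc.2.1 + 1, acc.2.2)
        else if cell = "Y" then (acc.1, acc.2.1, acc.2.2 + 1)
        else acc) acc) ((0 : Int), (0 : Int), (0 : Int)), kleuren_outer]
  simp

-- ===== VERDICT =====
theorem kleuren_spec : Claim_equal_kleuren := by
  intro lijst _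
  unfold Spec_kleuren kleuren_alt
  simp [PySem.List.count_eq, kleuren_counts]
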